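-- pv_equiv track=rewrite | github.com/vadym-lwaynen/lab7 | main.py | lengthOfEachSubArray
-- ===== SOURCE A (Python) =====
-- def lengthOfEachSubArray(size):
--     arr = [None] * size
--
--     for i in range(size):
--         length = 0
--         for j in range(size):
--             if (i == 0 or i == size - 1 or j == 0 or j == size - 1) or (i != 1 and i != size - 2 and j != 1 and j != size - 2):
--                 length += 1
--         arr[i] = [""] * length
--
--     return arr
-- ===== SOURCE B (Python) =====
-- def lengthOfEachSubArray(size):
--     def row_len(i):
--         if i == 0 or i == size - 1:
--             return size
--         if i == 1 or i == size - 2: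
--             return 2
--         return size - 2
--     return [[""] * row_len(i) for i in range(size)]
-- ===== Notes on version B (the rewrite author's own statement) =====
-- stated objective: faster
-- what changed: Replaced A's inner O(size) counting loop per row by an O(1) closed-form row length (size for border rows, 2 for rows 1 and size-2, size-2 otherwise), building each row directly.
import Mathlib
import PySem

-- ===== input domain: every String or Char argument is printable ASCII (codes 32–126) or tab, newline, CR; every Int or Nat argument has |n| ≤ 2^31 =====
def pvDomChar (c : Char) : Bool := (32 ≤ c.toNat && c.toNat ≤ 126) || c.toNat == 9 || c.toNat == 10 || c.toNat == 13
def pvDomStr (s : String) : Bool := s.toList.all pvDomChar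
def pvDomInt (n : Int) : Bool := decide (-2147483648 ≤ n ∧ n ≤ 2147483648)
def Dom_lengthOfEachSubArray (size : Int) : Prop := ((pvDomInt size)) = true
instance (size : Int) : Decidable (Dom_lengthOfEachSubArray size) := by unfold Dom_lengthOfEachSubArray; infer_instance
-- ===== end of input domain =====

-- B replaces A's inner counting loop over range(size) by an O(1) closed-form row length
-- (size for border rows, 2 for rows 1 and size-2, size-2 otherwise); objective: faster.

-- ===== PORT A =====
def lengthOfEachSubArray (size : Int) : List (List String) :=
  (PySem.List.pyRange 0 size 1).map (fun i =>
    let length : Int :=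
      (PySem.List.pyRange 0 size 1).foldl
        (fun acc j =>
          if (i = 0 ∨ i = size - 1 ∨ j = 0 ∨ j = size - 1) ∨
             (i ≠ 1 ∧ i ≠ size - 2 ∧ j ≠ 1 ∧ j ≠ size - 2) then acc + 1 else acc) 0
    -- [""] * length with 0 ≤ length: exact as List.replicate length.toNat
    List.replicate length.toNat "")

-- ===== PORT B =====
def rowLen (size i : Int) : Int :=
  if i = 0 ∨ i = size - 1 then size
  else if i = 1 ∨ i = size - 2 then 2
  else size - 2

def lengthOfEachSubArray_alt (size : Int) : List (List String) :=
  (PySem.List.pyRange 0 size 1).map (fun i => List.replicate (rowLen size i).toNat "")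

-- ===== PRECONDITION & SPEC =====
def Spec_lengthOfEachSubArray (size : Int) (out : List (List String)) : Prop := out = lengthOfEachSubArray_alt size
instance (size : Int) (out : List (List String)) : Decidable (Spec_lengthOfEachSubArray size out) := by unfold Spec_lengthOfEachSubArray; infer_instance

-- ===== CLAIM (what is proved, stated in full; the proofs are below) =====
def Claim_equal_lengthOfEachSubArray : Prop := ∀ (size : Int), Dom_lengthOfEachSubArray size → Spec_lengthOfEachSubArray size (lengthOfEachSubArray size)

-- ===== LEMMAS AND PROOFS =====

-- A's inner loop over range(size) computes exactly rowLen size i for every row index i.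
theorem count_row (n i : Int) (h0 : 0 ≤ i) (h1 : i < n) :
    (PySem.List.pyRange 0 n 1).foldl
      (fun acc j =>
        if (i = 0 ∨ i = n - 1 ∨ j = 0 ∨ j = n - 1) ∨
           (i ≠ 1 ∧ i ≠ n - 2 ∧ j ≠ 1 ∧ j ≠ n - 2) then acc + 1 else acc) 0
    = rowLen n i := by
  rw [PySem.List.foldl_ite_add_one
    (fun j => (i = 0 ∨ i = n - 1 ∨ j = 0 ∨ j = n - 1) ∨
      (i ≠ 1 ∧ i ≠ n - 2 ∧ j ≠ 1 ∧ j ≠ n - 2))]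
  unfold rowLen
  by_cases hA : i = 0 ∨ i = n - 1
  · rw [if_pos hA, List.countP_eq_length.mpr, PySem.List.length_pyRange_one]
    · omega
    · intro j hj
      simp only [decide_eq_true_eq]
      omega
  · rw [if_neg hA]
    by_cases hB : i = 1 ∨ i = n - 2
    · rw [if_pos hB]
      have hn : 3 ≤ n := by omega
      rw [PySem.List.pyRange_one_append 0 1 n (by omega) (by omega),
          PySem.List.pyRange_one_append 1 (n - 1) n (by omega) (by omega),
          List.countP_append, List.countP_append]
      have c1 : (PySem.List.pyRange 0 1).countP
          (fun j => decide ((i = 0 ∨ i = n - 1 ∨ j = 0 ∨ j = n - 1) ∨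
            (i ≠ 1 ∧ i ≠ n - 2 ∧ j ≠ 1 ∧ j ≠ n - 2))) = (PySem.List.pyRange 0 1).length :=
        List.countP_eq_length.mpr (by
          intro j hj
          rw [PySem.List.mem_pyRange_one] at hj
          simp only [decide_eq_true_eq]
          omega)
      have c2 : (PySem.List.pyRange 1 (n - 1)).countP
          (fun j => decide ((i = 0 ∨ i = n - 1 ∨ j = 0 ∨ j = n - 1) ∨
            (i ≠ 1 ∧ i ≠ n - 2 ∧ j ≠ 1 ∧ j ≠ n - 2))) = 0 :=
        List.countP_eq_zero.mpr (by
          intro j hj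
          rw [PySem.List.mem_pyRange_one] at hj
          simp only [decide_eq_true_eq]
          omega)
      have c3 : (PySem.List.pyRange (n - 1) n).countP
          (fun j => decide ((i = 0 ∨ i = n - 1 ∨ j = 0 ∨ j = n - 1) ∨
            (i ≠ 1 ∧ i ≠ n - 2 ∧ j ≠ 1 ∧ j ≠ n - 2))) = (PySem.List.pyRange (n - 1) n).length :=
        List.countP_eq_length.mpr (by
          intro j hj
          rw [PySem.List.mem_pyRange_one] at hj
          simp only [decide_eq_true_eq]
          omega)
      rw [c1, c2, c3, PySem.List.length_pyRange_one, PySem.List.length_pyRange_one]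
      omega
    · rw [if_neg hB]
      have hn : 5 ≤ n := by omega
      rw [PySem.List.pyRange_one_append 0 1 n (by omega) (by omega),
          PySem.List.pyRange_one_append 1 2 n (by omega) (by omega),
          PySem.List.pyRange_one_append 2 (n - 2) n (by omega) (by omega),
          PySem.List.pyRange_one_append (n - 2) (n - 1) n (by omega) (by omega),
          List.countP_append, List.countP_append, List.countP_append, List.countP_append]
      have c1 : (PySem.List.pyRange 0 1).countP
          (fun j => decide ((i = 0 ∨ i = n - 1 ∨ j = 0 ∨ j = n - 1) ∨
            (i ≠ 1 ∧ i ≠ n - 2 ∧ j ≠ 1 ∧ j ≠ n - 2))) = (PySem.List.pyRange 0 1).length :=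
        List.countP_eq_length.mpr (by
          intro j hj
          rw [PySem.List.mem_pyRange_one] at hj
          simp only [decide_eq_true_eq]
          omega)
      have c2 : (PySem.List.pyRange 1 2).countP
          (fun j => decide ((i = 0 ∨ i = n - 1 ∨ j = 0 ∨ j = n - 1) ∨
            (i ≠ 1 ∧ i ≠ n - 2 ∧ j ≠ 1 ∧ j ≠ n - 2))) = 0 :=
        List.countP_eq_zero.mpr (by
          intro j hj
          rw [PySem.List.mem_pyRange_one] at hj
          simp only [decide_eq_true_eq]
          omega)
      have c3 : (PySem.List.pyRange 2 (n - 2)).countP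
          (fun j => decide ((i = 0 ∨ i = n - 1 ∨ j = 0 ∨ j = n - 1) ∨
            (i ≠ 1 ∧ i ≠ n - 2 ∧ j ≠ 1 ∧ j ≠ n - 2))) = (PySem.List.pyRange 2 (n - 2)).length :=
        List.countP_eq_length.mpr (by
          intro j hj
          rw [PySem.List.mem_pyRange_one] at hj
          simp only [decide_eq_true_eq]
          omega)
      have c4 : (PySem.List.pyRange (n - 2) (n - 1)).countP
          (fun j => decide ((i = 0 ∨ i = n - 1 ∨ j = 0 ∨ j = n - 1) ∨
            (i ≠ 1 ∧ i ≠ n - 2 ∧ j ≠ 1 ∧ j ≠ n - 2))) = 0 :=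
        List.countP_eq_zero.mpr (by
          intro j hj
          rw [PySem.List.mem_pyRange_one] at hj
          simp only [decide_eq_true_eq]
          omega)
      have c5 : (PySem.List.pyRange (n - 1) n).countP
          (fun j => decide ((i = 0 ∨ i = n - 1 ∨ j = 0 ∨ j = n - 1) ∨
            (i ≠ 1 ∧ i ≠ n - 2 ∧ j ≠ 1 ∧ j ≠ n - 2))) = (PySem.List.pyRange (n - 1) n).length :=
        List.countP_eq_length.mpr (by
          intro j hj
          rw [PySem.List.mem_pyRange_one] at hj
          simp only [decide_eq_true_eq]
          omega)
      rw [c1, c2, c3, c4, c5, PySem.List.length_pyRange_one, PySem.List.length_pyRange_one,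
          PySem.List.length_pyRange_one]
      omega

-- ===== VERDICT (by name: the statement is the Claim_ definition above) =====
theorem lengthOfEachSubArray_spec : Claim_equal_lengthOfEachSubArray := by
  intro size _
  unfold Spec_lengthOfEachSubArray lengthOfEachSubArray lengthOfEachSubArray_alt
  apply List.map_congr_left
  intro i hi
  rw [PySem.List.mem_pyRange_one] at hi
  rw [count_row size i hi.1 hi.2]
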